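-- pv_equiv track=rewrite | github.com/mrsurge/termux-extensions-2 | app/apps/archive_manager/backend.py | _parse_7zz_slt
-- ===== SOURCE A (Python) =====
-- from typing import Any, Dict, Iterable, List, Optional
--
-- def _parse_7zz_slt(output: str) -> List[Dict[str, str]]:
--     records: List[Dict[str, str]] = []
--     current: Dict[str, str] = {}
--     seen_path = False
--
--     for raw_line in output.splitlines():
--         line = raw_line.strip()
--         if not line:
--             if current:
--                 records.append(current)
--                 current = {}
--                 seen_path = False
--             continue
--         if line.startswith("EVENT"):
--             # Skip progress events printed when -bb or similar is enabled
--             continue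
--         if line.startswith("Path = "):
--             if current and seen_path:
--                 records.append(current)
--                 current = {}
--             seen_path = True
--         if " = " in line:
--             key, value = line.split(" = ", 1)
--             current[key.strip()] = value.strip()
--     if current:
--         records.append(current)
--     return records
-- ===== SOURCE B (Python) =====
-- from typing import Dict, List
--
--
-- def _parse_7zz_slt(output: str) -> List[Dict[str, str]]:
--     # Pass 1: cut the stripped, non-EVENT lines into record groups.
--     groups: List[List[str]] = []
--     group: List[str] = []
--     seen_path = False
--     for raw_line in output.splitlines():
--         line = raw_line.strip()
--         if not line:
--             groups.append(group)
--             group = []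
--             seen_path = False
--             continue
--         if line.startswith("EVENT"):
--             continue
--         if line.startswith("Path = "):
--             if seen_path:
--                 groups.append(group)
--                 group = [line]
--                 continue
--             seen_path = True
--         group.append(line)
--     groups.append(group)
--
--     # Pass 2: turn each group into a record dict; keep only non-empty ones.
--     records: List[Dict[str, str]] = []
--     for g in groups:
--         record: Dict[str, str] = {}
--         for line in g:
--             if " = " in line:
--                 key, value = line.split(" = ", 1)
--                 record[key.strip()] = value.strip()
--         if record:
--             records.append(record)
--     return records
-- ===== Notes on version B (the rewrite author's own statement) =====
-- stated objective: alternative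
-- what changed: Replaced A's single interleaved state machine (dict built while scanning) by a two-pass decomposition: pass 1 only cuts the stripped lines into record groups (blank-line and repeated-Path boundaries), pass 2 maps each group to its key/value dict and keeps the non-empty ones.
import Mathlib
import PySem

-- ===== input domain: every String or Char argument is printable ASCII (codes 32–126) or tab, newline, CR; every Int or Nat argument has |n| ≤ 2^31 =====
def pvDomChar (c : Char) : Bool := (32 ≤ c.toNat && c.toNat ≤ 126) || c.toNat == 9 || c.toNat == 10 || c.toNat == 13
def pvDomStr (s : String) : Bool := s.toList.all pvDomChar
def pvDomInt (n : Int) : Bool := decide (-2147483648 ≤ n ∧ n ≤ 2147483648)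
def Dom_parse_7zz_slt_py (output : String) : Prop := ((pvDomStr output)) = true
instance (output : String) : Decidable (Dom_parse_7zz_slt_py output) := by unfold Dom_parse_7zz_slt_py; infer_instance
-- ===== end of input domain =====

-- B replaces A's interleaved scan-and-build state machine by a two-pass decomposition
-- (cut lines into record groups, then map each group to a dict); alternative, not faster.

-- shared helper: line.split(" = ", 1) under the guard '" = " in line' (then exactly two pieces)
def pvSplitEq (line : String) : String × String :=
  match PySem.Str.splitMax? line " = " 1 with
  | some (k :: v :: _) => (k, v)
  | _ => (line, "")  -- unreachable under the '" = " in line' guard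

-- ===== PORT A =====
def parseAStep (st : List (PySem.Dict String String) × PySem.Dict String String × Bool)
    (raw_line : String) : List (PySem.Dict String String) × PySem.Dict String String × Bool :=
  let records := st.1
  let current := st.2.1
  let seen_path := st.2.2
  let line := PySem.Str.strip raw_line
  if line = "" then
    if current.items ≠ [] then (records ++ [current], PySem.Dict.empty, false)
    else (records, current, seen_path)
  else if PySem.Str.startswith line "EVENT" then
    (records, current, seen_path)
  else
    let st2 : List (PySem.Dict String String) × PySem.Dict String String × Bool :=
      if PySem.Str.startswith line "Path = " then
        if current.items ≠ [] ∧ seen_path = true then (records ++ [current], PySem.Dict.empty, true)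
        else (records, current, true)
      else (records, current, seen_path)
    if PySem.Str.isIn " = " line then
      let kv := pvSplitEq line
      (st2.1, st2.2.1.insert (PySem.Str.strip kv.1) (PySem.Str.strip kv.2), st2.2.2)
    else st2

def parse_7zz_slt_py (output : String) : List (List (String × String)) :=
  let fin := (PySem.Str.splitlines output).foldl parseAStep ([], PySem.Dict.empty, false)
  let records := if fin.2.1.items ≠ [] then fin.1 ++ [fin.2.1] else fin.1
  records.map PySem.Dict.items

-- ===== PORT B =====
-- pass 1: cut the stripped, non-EVENT lines into record groups
def parseBGroupStep (st : List (List String) × List String × Bool)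
    (raw_line : String) : List (List String) × List String × Bool :=
  let groups := st.1
  let group := st.2.1
  let seen_path := st.2.2
  let line := PySem.Str.strip raw_line
  if line = "" then (groups ++ [group], [], false)
  else if PySem.Str.startswith line "EVENT" then st
  else if PySem.Str.startswith line "Path = " then
    if seen_path then (groups ++ [group], [line], true)
    else (groups, group ++ [line], true)
  else (groups, group ++ [line], seen_path)

-- pass 2: one group -> its record dict
def parseBRecord (g : List String) : PySem.Dict String String :=
  g.foldl (fun record line =>
    if PySem.Str.isIn " = " line then
      let kv := pvSplitEq line
      record.insert (PySem.Str.strip kv.1) (PySem.Str.strip kv.2)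
    else record) PySem.Dict.empty

def parse_7zz_slt_py_alt (output : String) : List (List (String × String)) :=
  let fin := (PySem.Str.splitlines output).foldl parseBGroupStep ([], [], false)
  (((fin.1 ++ [fin.2.1]).map fun g => (parseBRecord g).items).filter (· ≠ []))

-- ===== PRECONDITION & SPEC =====
def Spec_parse_7zz_slt_py (output : String) (out : List (List (String × String))) : Prop := out = parse_7zz_slt_py_alt output
instance (output : String) (out : List (List (String × String))) : Decidable (Spec_parse_7zz_slt_py output out) := by unfold Spec_parse_7zz_slt_py; infer_instance

-- ===== CLAIM (what is proved, stated in full; the proofs are below) =====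
def Claim_equal_parse_7zz_slt_py : Prop := ∀ (output : String), Dom_parse_7zz_slt_py output → Spec_parse_7zz_slt_py output (parse_7zz_slt_py output)

-- ===== LEMMAS AND PROOFS =====

lemma items_insert_ne_nil (d : PySem.Dict String String) (k v : String) :
    (d.insert k v).items ≠ [] :=
  List.ne_nil_of_mem (PySem.Dict.mem_items_insert_self d k v)

lemma isIn_of_startswith_path (line : String)
    (h : PySem.Str.startswith line "Path = " = true) :
    PySem.Str.isIn " = " line = true := by
  have hp : ("Path = ".toList) <+: line.toList :=
    (PySem.Chars.startswith_iff _ _).mp (by simpa using h)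
  have h2 : (" = ".toList) <:+: ("Path = ".toList) := by decide
  exact (PySem.Str.isIn_iff_infix _ _).mpr (h2.trans hp.isInfix)

lemma parseBRecord_append (g : List String) (l : String) :
    parseBRecord (g ++ [l]) =
      (if PySem.Str.isIn " = " l then
        (parseBRecord g).insert (PySem.Str.strip (pvSplitEq l).1) (PySem.Str.strip (pvSplitEq l).2)
      else parseBRecord g) := by
  simp [parseBRecord, List.foldl_append]

lemma dict_eq_empty_of_items_nil (d : PySem.Dict String String) (h : d.items = []) :
    d = PySem.Dict.empty := by
  obtain ⟨l⟩ := d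
  simp at h
  subst h
  rfl

set_option maxHeartbeats 1000000 in
lemma loop_rel (lines : List String)
    (rA : List (PySem.Dict String String)) (cA : PySem.Dict String String) (s : Bool)
    (gB : List (List String)) (cB : List String)
    (h1 : rA.map PySem.Dict.items = ((gB.map fun g => (parseBRecord g).items).filter (· ≠ [])))
    (h2 : cA = parseBRecord cB)
    (h3 : s = true → cA.items ≠ []) :
    (let fa := lines.foldl parseAStep (rA, cA, s)
     (if fa.2.1.items ≠ [] then fa.1 ++ [fa.2.1] else fa.1).map PySem.Dict.items) =
    (let fb := lines.foldl parseBGroupStep (gB, cB, s)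
     ((fb.1 ++ [fb.2.1]).map fun g => (parseBRecord g).items).filter (· ≠ [])) := by
  induction lines generalizing rA cA s gB cB with
  | nil =>
    subst h2
    simp only [List.foldl_nil]
    by_cases hc : (parseBRecord cB).items = []
    · simp [hc, h1, List.filter_append]
    · simp [hc, h1, List.filter_append]
  | cons raw rest ih =>
    simp only [List.foldl_cons]
    by_cases hblank : PySem.Str.strip raw = ""
    · -- blank line
      by_cases hc : cA.items = []
      · have hs : s = false := by
          cases s with
          | false => rfl
          | true => exact absurd hc (by simpa using h3 rfl)
        rw [show parseAStep (rA, cA, s) raw = (rA, cA, s) by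
              simp [parseAStep, hblank, hc],
            show parseBGroupStep (gB, cB, s) raw = (gB ++ [cB], [], false) by
              simp [parseBGroupStep, hblank]]
        rw [hs]
        exact ih rA cA false (gB ++ [cB]) []
          (by simp [h1, List.filter_append, ← h2, hc])
          ((dict_eq_empty_of_items_nil cA hc).trans rfl) (by simp [hc])
      · rw [show parseAStep (rA, cA, s) raw = (rA ++ [cA], PySem.Dict.empty, false) by
              simp [parseAStep, hblank, hc],
            show parseBGroupStep (gB, cB, s) raw = (gB ++ [cB], [], false) by
              simp [parseBGroupStep, hblank]]
        exact ih (rA ++ [cA]) PySem.Dict.empty false (gB ++ [cB]) []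
          (by simp [h1, List.filter_append, ← h2, hc]) rfl (by simp)
    · by_cases hev : PySem.Str.startswith (PySem.Str.strip raw) "EVENT" = true
      · simp at hev
        rw [show parseAStep (rA, cA, s) raw = (rA, cA, s) by
              simp [parseAStep, hblank, hev],
            show parseBGroupStep (gB, cB, s) raw = (gB, cB, s) by
              simp [parseBGroupStep, hblank, hev]]
        exact ih rA cA s gB cB h1 h2 h3
      · by_cases hpath : PySem.Str.startswith (PySem.Str.strip raw) "Path = " = true
        · have heq := isIn_of_startswith_path _ hpath
          simp at hev hpath heq
          cases s with
          | true =>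
            have hc := h3 rfl
            rw [show parseAStep (rA, cA, true) raw =
                  (rA ++ [cA], PySem.Dict.empty.insert
                    (PySem.Str.strip (pvSplitEq (PySem.Str.strip raw)).1)
                    (PySem.Str.strip (pvSplitEq (PySem.Str.strip raw)).2), true) by
                  simp [parseAStep, hblank, hev, hpath, hc, heq],
                show parseBGroupStep (gB, cB, true) raw = (gB ++ [cB], [PySem.Str.strip raw], true) by
                  simp [parseBGroupStep, hblank, hev, hpath]]
            refine ih _ _ true _ _
              (by simp [h1, List.filter_append, ← h2, hc]) ?_ (fun _ => items_insert_ne_nil _ _ _)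
            have hsplit : parseBRecord [PySem.Str.strip raw] =
                parseBRecord ([] ++ [PySem.Str.strip raw]) := by simp
            rw [hsplit, parseBRecord_append, if_pos (by simpa using heq)]
            rfl
          | false =>
            rw [show parseAStep (rA, cA, false) raw =
                  (rA, cA.insert
                    (PySem.Str.strip (pvSplitEq (PySem.Str.strip raw)).1)
                    (PySem.Str.strip (pvSplitEq (PySem.Str.strip raw)).2), true) by
                  simp [parseAStep, hblank, hev, hpath, heq],
                show parseBGroupStep (gB, cB, false) raw = (gB, cB ++ [PySem.Str.strip raw], true) by
                  simp [parseBGroupStep, hblank, hev, hpath]]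
            refine ih _ _ true _ _ h1 ?_ (fun _ => items_insert_ne_nil _ _ _)
            rw [parseBRecord_append, if_pos (by simpa using heq), ← h2]
        · by_cases hin : PySem.Str.isIn " = " (PySem.Str.strip raw) = true
          · simp at hev hpath hin
            rw [show parseAStep (rA, cA, s) raw =
                  (rA, cA.insert
                    (PySem.Str.strip (pvSplitEq (PySem.Str.strip raw)).1)
                    (PySem.Str.strip (pvSplitEq (PySem.Str.strip raw)).2), s) by
                  simp [parseAStep, hblank, hev, hpath, hin],
                show parseBGroupStep (gB, cB, s) raw = (gB, cB ++ [PySem.Str.strip raw], s) by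
                  simp [parseBGroupStep, hblank, hev, hpath]]
            refine ih _ _ s _ _ h1 ?_ (fun _ => items_insert_ne_nil _ _ _)
            rw [parseBRecord_append, if_pos (by simpa using hin), ← h2]
          · simp at hev hpath hin
            rw [show parseAStep (rA, cA, s) raw = (rA, cA, s) by
                  simp [parseAStep, hblank, hev, hpath, hin],
                show parseBGroupStep (gB, cB, s) raw = (gB, cB ++ [PySem.Str.strip raw], s) by
                  simp [parseBGroupStep, hblank, hev, hpath]]
            refine ih _ _ s _ _ h1 ?_ h3
            rw [parseBRecord_append, if_neg (by simpa using hin), ← h2]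

-- ===== VERDICT (by name: the statement is the Claim_ definition above) =====
theorem parse_7zz_slt_py_spec : Claim_equal_parse_7zz_slt_py := by
  intro output _
  unfold Spec_parse_7zz_slt_py parse_7zz_slt_py parse_7zz_slt_py_alt
  exact loop_rel (PySem.Str.splitlines output) [] PySem.Dict.empty false [] []
    rfl rfl (by simp)
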